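-- pv_equiv track=rewrite | github.com/khuushichand/aiml-project | Helper_Scripts/TTS_Installers/install_tts_pocket_tts_cpp.py | _find_provider_block
-- ===== SOURCE A (Python) =====
-- from typing import Iterable, Optional, Sequence
--
-- def _find_provider_block(lines: list[str], provider_name: str) -> tuple[Optional[int], Optional[int], Optional[int]]:
--     in_providers = False
--     providers_indent: Optional[int] = None
--     for idx, line in enumerate(lines):
--         stripped = line.strip()
--         if not stripped or stripped.startswith("#"):
--             continue
--         indent = len(line) - len(line.lstrip(" "))
--         if not in_providers:
--             if stripped == "providers:":
--                 in_providers = True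
--                 providers_indent = indent
--             continue
--         if providers_indent is not None and indent <= providers_indent:
--             in_providers = False
--             continue
--         if stripped.startswith(f"{provider_name}:"):
--             block_start = idx
--             block_indent = indent
--             block_end = idx + 1
--             while block_end < len(lines):
--                 next_line = lines[block_end]
--                 next_stripped = next_line.strip()
--                 if not next_stripped or next_stripped.startswith("#"):
--                     block_end += 1
--                     continue
--                 next_indent = len(next_line) - len(next_line.lstrip(" "))
--                 if next_indent <= block_indent:
--                     break
--                 block_end += 1
--             return block_start, block_end, block_indent
--     return None, None, None
-- ===== SOURCE B (Python) =====
-- from typing import Optional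
--
-- def _find_provider_block(lines: list[str], provider_name: str) -> tuple[Optional[int], Optional[int], Optional[int]]:
--     # Parser-style decomposition: build the table of meaningful lines once, then
--     # repeatedly locate a "providers:" header, delimit its section by indentation,
--     # and search the provider inside it; no in_providers/providers_indent state machine.
--     meaningful = []
--     for idx, line in enumerate(lines):
--         stripped = line.strip()
--         if stripped and not stripped.startswith("#"):
--             meaningful.append((idx, len(line) - len(line.lstrip(" ")), stripped))
--     prefix = provider_name + ":"
--     n = len(meaningful)
--     pos = 0
--     while pos < n:
--         # next providers header at or after pos
--         while pos < n and meaningful[pos][2] != "providers:":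
--             pos += 1
--         if pos == n:
--             break
--         header_indent = meaningful[pos][1]
--         # walk its section: entries deeper than the header, until the dedent line
--         q = pos + 1
--         while q < n and meaningful[q][1] > header_indent:
--             if meaningful[q][2].startswith(prefix):
--                 idx, block_indent = meaningful[q][0], meaningful[q][1]
--                 end = len(lines)
--                 for r in range(q + 1, n):
--                     if meaningful[r][1] <= block_indent:
--                         end = meaningful[r][0]
--                         break
--                 return idx, end, block_indent
--             q += 1
--         pos = q + 1  # the dedent line itself is never a header
--     return None, None, None
-- ===== Notes on version B (the rewrite author's own statement) =====
-- stated objective: alternative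
-- what changed: B replaces A's in_providers/providers_indent state machine and nested raw-line while with a parser-style decomposition: it builds a table of meaningful lines once, then repeatedly locates the next 'providers:' header, delimits its section by indentation, and searches the provider inside that section only.
import Mathlib
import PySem

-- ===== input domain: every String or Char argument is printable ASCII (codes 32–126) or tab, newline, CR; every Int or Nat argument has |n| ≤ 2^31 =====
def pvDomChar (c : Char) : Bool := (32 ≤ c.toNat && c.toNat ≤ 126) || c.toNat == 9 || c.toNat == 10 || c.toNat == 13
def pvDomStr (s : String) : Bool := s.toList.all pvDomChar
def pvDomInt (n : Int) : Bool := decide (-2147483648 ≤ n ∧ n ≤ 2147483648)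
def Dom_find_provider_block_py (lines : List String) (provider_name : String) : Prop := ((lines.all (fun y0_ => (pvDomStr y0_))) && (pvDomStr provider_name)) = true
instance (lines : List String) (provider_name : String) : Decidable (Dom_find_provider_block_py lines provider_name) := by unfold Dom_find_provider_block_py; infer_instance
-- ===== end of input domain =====

-- B replaces A's state machine + nested while by a parser-style decomposition over a
-- table of meaningful lines (objective: alternative, same cost).

-- ===== PORT A =====
-- shared primitive: len(line) - len(line.lstrip(" ")) — leading-space count, ported by
-- hand with dropWhile (PySem has no lstrip-with-chars); exact: lstrip(" ") drops exactly
-- the leading ' ' characters.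
def pvIndent (line : String) : Int :=
  (line.toList.length : Int) - ((line.toList.dropWhile (· == ' ')).length : Int)

-- the inner 'while block_end < len(lines)' of A, as recursion over the remaining lines
def pyAWhile : List String → Int → Int → Int
  | [], block_end, _ => block_end
  | next_line :: rest, block_end, block_indent =>
    let next_stripped := PySem.Str.strip next_line
    if next_stripped = "" ∨ PySem.Str.startswith next_stripped "#" = true then
      pyAWhile rest (block_end + 1) block_indent
    else if pvIndent next_line ≤ block_indent then block_end
    else pyAWhile rest (block_end + 1) block_indent

-- the 'for idx, line in enumerate(lines)' of A, carrying (in_providers, providers_indent)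
def pyALoop (provider_name : String) : Nat → List String → Bool → Option Int → Option Int × Option Int × Option Int
  | _, [], _, _ => (none, none, none)
  | idx, line :: rest, in_providers, providers_indent =>
    let stripped := PySem.Str.strip line
    if stripped = "" ∨ PySem.Str.startswith stripped "#" = true then
      pyALoop provider_name (idx + 1) rest in_providers providers_indent
    else
      let indent := pvIndent line
      if in_providers = false then
        (if stripped = "providers:" then pyALoop provider_name (idx + 1) rest true (some indent)
         else pyALoop provider_name (idx + 1) rest false providers_indent)
      else if providers_indent.any (fun p => decide (indent ≤ p)) = true then
        pyALoop provider_name (idx + 1) rest false providers_indent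
      else if PySem.Str.startswith stripped (provider_name ++ ":") = true then
        (some (idx : Int), some (pyAWhile rest ((idx : Int) + 1) indent), some indent)
      else pyALoop provider_name (idx + 1) rest in_providers providers_indent

def find_provider_block_py (lines : List String) (provider_name : String) : Option Int × Option Int × Option Int :=
  pyALoop provider_name 0 lines false none

-- ===== PORT B =====
-- B's first pass: the table of meaningful lines (original index, indent, stripped)
def pyTable : Nat → List String → List (Nat × Int × String)
  | _, [] => []
  | idx, line :: rest =>
    let stripped := PySem.Str.strip line
    if stripped = "" ∨ PySem.Str.startswith stripped "#" = true then pyTable (idx + 1) rest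
    else (idx, pvIndent line, stripped) :: pyTable (idx + 1) rest

-- B's 'for r in range(q+1, n): if meaningful[r][1] <= block_indent: end = …; break'
def pyBEnd (n : Nat) (indent : Int) : List (Nat × Int × String) → Int
  | [] => (n : Int)
  | (jdx, jindent, _) :: rest => if jindent ≤ indent then (jdx : Int) else pyBEnd n indent rest

-- B's two nested while loops over the table: pyBHeader hunts the next "providers:"
-- header, pyBSection walks that header's section (entries deeper than it) looking for
-- the provider; on the dedent entry it resumes header-hunting AFTER that entry.
mutual
def pyBHeader (n : Nat) (pref : String) : List (Nat × Int × String) → Option Int × Option Int × Option Int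
  | [] => (none, none, none)
  | (_, indent, stripped) :: rest =>
    if stripped = "providers:" then pyBSection n pref indent rest
    else pyBHeader n pref rest

def pyBSection (n : Nat) (pref : String) (header_indent : Int) : List (Nat × Int × String) → Option Int × Option Int × Option Int
  | [] => (none, none, none)
  | (idx, indent, stripped) :: rest =>
    if header_indent < indent then
      if PySem.Str.startswith stripped pref = true then
        (some (idx : Int), some (pyBEnd n indent rest), some indent)
      else pyBSection n pref header_indent rest
    else pyBHeader n pref rest
end

def find_provider_block_py_alt (lines : List String) (provider_name : String) : Option Int × Option Int × Option Int :=
  pyBHeader lines.length (provider_name ++ ":") (pyTable 0 lines)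

-- ===== PRECONDITION & SPEC =====
def Spec_find_provider_block_py (lines : List String) (provider_name : String) (out : Option Int × Option Int × Option Int) : Prop := out = find_provider_block_py_alt lines provider_name
instance (lines : List String) (provider_name : String) (out : Option Int × Option Int × Option Int) : Decidable (Spec_find_provider_block_py lines provider_name out) := by unfold Spec_find_provider_block_py; infer_instance

-- ===== CLAIM (what is proved, stated in full; the proofs are below) =====
def Claim_equal_find_provider_block_py : Prop := ∀ (lines : List String) (provider_name : String), Dom_find_provider_block_py lines provider_name → Spec_find_provider_block_py lines provider_name (find_provider_block_py lines provider_name)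

-- ===== LEMMAS AND PROOFS =====

-- proof-side intermediate: A's state machine replayed over the table
def tblScan (n : Nat) (pn : String) : List (Nat × Int × String) → Bool → Option Int → Option Int × Option Int × Option Int
  | [], _, _ => (none, none, none)
  | (idx, indent, stripped) :: rest, in_providers, providers_indent =>
    if in_providers = false then
      (if stripped = "providers:" then tblScan n pn rest true (some indent)
       else tblScan n pn rest false providers_indent)
    else if providers_indent.any (fun p => decide (indent ≤ p)) = true then
      tblScan n pn rest false providers_indent
    else if PySem.Str.startswith stripped (pn ++ ":") = true then
      (some (idx : Int), some (pyBEnd n indent rest), some indent)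
    else tblScan n pn rest in_providers providers_indent

theorem tblScan_cons (n : Nat) (pn : String) (idx : Nat) (indent : Int) (stripped : String)
    (rest : List (Nat × Int × String)) (inP : Bool) (pI : Option Int) :
    tblScan n pn ((idx, indent, stripped) :: rest) inP pI =
      (if inP = false then
        (if stripped = "providers:" then tblScan n pn rest true (some indent)
         else tblScan n pn rest false pI)
      else if pI.any (fun p => decide (indent ≤ p)) = true then tblScan n pn rest false pI
      else if PySem.Str.startswith stripped (pn ++ ":") = true then
        (some (idx : Int), some (pyBEnd n indent rest), some indent)
      else tblScan n pn rest inP pI) := rfl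

-- A's inner while over the raw suffix equals B's forward find in the table of that suffix
theorem pyAWhile_eq_pyBEnd (rest : List String) : ∀ (k : Nat) (bi : Int),
    pyAWhile rest (k : Int) bi = pyBEnd (k + rest.length) bi (pyTable k rest) := by
  induction rest with
  | nil => intro k bi; simp [pyAWhile, pyTable, pyBEnd]
  | cons line rest ih =>
    intro k bi
    simp only [pyAWhile, pyTable, List.length_cons]
    have hcast : ((k : Int) + 1) = ((k + 1 : Nat) : Int) := by push_cast; ring
    split_ifs with h1 h2
    · rw [hcast, ih (k + 1) bi]; congr 1; omega
    · simp [pyBEnd, h2]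
    · simp only [pyBEnd, if_neg h2]
      rw [hcast, ih (k + 1) bi]; congr 1; omega

-- A's main loop equals the table replay, for any start index and state
theorem pyALoop_eq_tblScan (pn : String) (rest : List String) : ∀ (idx : Nat) (inP : Bool) (pI : Option Int),
    pyALoop pn idx rest inP pI = tblScan (idx + rest.length) pn (pyTable idx rest) inP pI := by
  induction rest with
  | nil => intro idx inP pI; simp [pyALoop, pyTable, tblScan]
  | cons line rest ih =>
    intro idx inP pI
    have hn : idx + 1 + rest.length = idx + (line :: rest).length := by simp; omega
    simp only [pyALoop, pyTable]
    split_ifs with h1 h2 h3 h4 h5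
    · rw [ih (idx + 1) inP pI, hn]
    · rw [tblScan_cons, if_pos h2, if_pos h3, ih (idx + 1) true (some (pvIndent line)), hn]
    · rw [tblScan_cons, if_pos h2, if_neg h3, ih (idx + 1) false pI, hn]
    · rw [tblScan_cons, if_neg h2, if_pos h4, ih (idx + 1) false pI, hn]
    · rw [tblScan_cons, if_neg h2, if_neg h4, if_pos h5]
      have hcast : ((idx : Int) + 1) = ((idx + 1 : Nat) : Int) := by push_cast; ring
      rw [hcast, pyAWhile_eq_pyBEnd rest (idx + 1) (pvIndent line), hn]
    · rw [tblScan_cons, if_neg h2, if_neg h4, if_neg h5, ih (idx + 1) inP pI, hn]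

-- the table replay of A's state machine equals B's header/section recursion
theorem tblScan_eq_pyB (n : Nat) (pn : String) (tbl : List (Nat × Int × String)) :
    (∀ pI, tblScan n pn tbl false pI = pyBHeader n (pn ++ ":") tbl) ∧
    (∀ h, tblScan n pn tbl true (some h) = pyBSection n (pn ++ ":") h tbl) := by
  induction tbl with
  | nil => exact ⟨fun _ => rfl, fun _ => rfl⟩
  | cons e rest ih =>
    obtain ⟨idx, indent, stripped⟩ := e
    constructor
    · intro pI
      by_cases hp : stripped = "providers:"
      · simp [tblScan, pyBHeader, hp, ih.2 indent]
      · simp [tblScan, pyBHeader, hp, ih.1 pI]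
    · intro h
      by_cases hd : indent ≤ h
      · simp [tblScan, pyBSection, hd, not_lt.2 hd, ih.1 (some h)]
      · simp only [tblScan, pyBSection, Option.any_some, decide_eq_true_eq,
          if_neg hd, if_pos (by omega : h < indent), Bool.true_eq_false, if_false]
        rw [ih.2 h]

-- ===== VERDICT (by name: the statement is the Claim_ definition above) =====
theorem find_provider_block_py_spec : Claim_equal_find_provider_block_py := by
  intro lines pn _
  unfold Spec_find_provider_block_py find_provider_block_py find_provider_block_py_alt
  rw [pyALoop_eq_tblScan pn lines 0 false none]
  simp only [Nat.zero_add]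
  exact (tblScan_eq_pyB lines.length pn (pyTable 0 lines)).1 none
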